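-- pv_equiv track=rewrite | github.com/Apisapple/Algorithm | programmers.co.kr/solution_250136.py | solution
-- ===== SOURCE A (Python) =====
-- from collections import deque
--
-- def solution(land: list):
--     height, width = len(land), len(land[0])
--     answer = [0] * width
--     visited = [[False] * width for _ in range(height)]
--     search_dir = [(0, 1), (0, -1), (1, 0), (-1, 0)]
--     oil_info = []
--
--     def search_oil_amount(x, y):
--
--         que = deque([(x, y)])
--         visited[x][y] = True
--         count = 1
--         oil_values = {y}
--
--         while que:
--             current_x, current_y = que.popleft()
--             for dx, dy in search_dir:
--                 next_x = current_x + dx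
--                 next_y = current_y + dy
--
--                 if (
--                     0 <= next_x < height
--                     and 0 <= next_y < width
--                     and not visited[next_x][next_y]
--                     and land[next_x][next_y] == 1
--                 ):
--                     visited[next_x][next_y] = True
--                     que.append((next_x, next_y))
--                     count += 1
--                     oil_values.add(next_y)
--
--         return (oil_values, count)
--
--     for x in range(height):
--         for y in range(width):
--             if land[x][y] and not visited[x][y]:
--                 oil_info.append(search_oil_amount(x, y))
--
--     for oil, cnt in oil_info:
--         for y in oil:
--             answer[y] += cnt
--
--     return max(answer)
-- ===== SOURCE B (Python) =====
-- def solution(land: list):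
--     # Round-based set-saturation flood fill (no queue): each round re-scans the
--     # component and absorbs every unvisited neighbouring 1-cell, until a round
--     # adds nothing; per-column totals are accumulated in place.
--     height, width = len(land), len(land[0])
--     answer = [0] * width
--     visited = [[False] * width for _ in range(height)]
--
--     for x in range(height):
--         for y in range(width):
--             if land[x][y] and not visited[x][y]:
--                 visited[x][y] = True
--                 comp = [(x, y)]
--                 grew = True
--                 while grew:
--                     grew = False
--                     for cx, cy in list(comp):
--                         for nx, ny in ((cx, cy + 1), (cx, cy - 1), (cx + 1, cy), (cx - 1, cy)):
--                             if (0 <= nx < height and 0 <= ny < width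
--                                     and not visited[nx][ny]
--                                     and land[nx][ny] == 1):
--                                 visited[nx][ny] = True
--                                 comp.append((nx, ny))
--                                 grew = True
--                 for cy in {cy for _, cy in comp}:
--                     answer[cy] += len(comp)
--     return max(answer)
-- ===== Notes on version B (the rewrite author's own statement) =====
-- stated objective: alternative
-- what changed: The per-component deque BFS (popleft queue, per-discovery count/column-set bookkeeping, deferred oil_info pass) is replaced by a queue-free round-based saturation: each round re-scans the component list and absorbs all unvisited neighbouring 1-cells until a fixpoint, and per-column totals are added to answer in place instead of being collected and replayed.
import Mathlib
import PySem

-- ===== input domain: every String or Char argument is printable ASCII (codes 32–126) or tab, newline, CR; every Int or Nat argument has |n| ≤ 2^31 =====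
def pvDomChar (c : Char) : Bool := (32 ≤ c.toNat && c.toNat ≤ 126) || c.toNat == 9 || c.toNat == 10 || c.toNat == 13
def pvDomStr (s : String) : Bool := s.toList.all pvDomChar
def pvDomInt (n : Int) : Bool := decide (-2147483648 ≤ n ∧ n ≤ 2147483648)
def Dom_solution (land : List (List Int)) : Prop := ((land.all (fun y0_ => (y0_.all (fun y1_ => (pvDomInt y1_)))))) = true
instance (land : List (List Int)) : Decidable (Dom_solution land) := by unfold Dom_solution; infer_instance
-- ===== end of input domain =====

-- B replaces A's per-component deque BFS (and its deferred oil_info replay) by a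
-- queue-free round-based saturation flood fill that updates the answer in place;
-- objective: alternative (same asymptotics on small components, no speed claim).

-- ===== PORT A =====
-- grid/visited accesses: every access below is guarded by 0 ≤ i < len, so
-- getD with .toNat is exact for the Python indexing it ports.
def pvGet (g : List (List Int)) (x y : Int) : Int := (g.getD x.toNat []).getD y.toNat 0
def pvVis (v : List (List Bool)) (x y : Int) : Bool := (v.getD x.toNat []).getD y.toNat false
def pvMark (v : List (List Bool)) (x y : Int) : List (List Bool) :=
  v.set x.toNat ((v.getD x.toNat []).set y.toNat true)

def bfsDirs : List (Int × Int) := [(0, 1), (0, -1), (1, 0), (-1, 0)]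

-- one iteration of A's while loop: the popped cell's four directions
def bfsStep (g : List (List Int)) (H W cx cy : Int)
    (st : List (List Bool) × List (Int × Int) × Int × PySem.Set Int) :
    List (List Bool) × List (Int × Int) × Int × PySem.Set Int :=
  bfsDirs.foldl (fun st d =>
    if 0 ≤ cx + d.1 ∧ cx + d.1 < H ∧ 0 ≤ cy + d.2 ∧ cy + d.2 < W ∧
        pvVis st.1 (cx + d.1) (cy + d.2) = false ∧ pvGet g (cx + d.1) (cy + d.2) = 1 then
      (pvMark st.1 (cx + d.1) (cy + d.2), st.2.1 ++ [(cx + d.1, cy + d.2)],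
       st.2.2.1 + 1, PySem.Set.add st.2.2.2 (cy + d.2))
    else st) st

-- A's while-loop; fuel only makes the recursion total (H*W+1 always suffices)
def bfsLoop (g : List (List Int)) (H W : Int) :
    Nat → List (List Bool) × List (Int × Int) × Int × PySem.Set Int →
    List (List Bool) × List (Int × Int) × Int × PySem.Set Int
  | 0, st => st
  | fuel + 1, st =>
    match st with
    | (v, [], cnt, oil) => (v, [], cnt, oil)
    | (v, c :: qs, cnt, oil) => bfsLoop g H W fuel (bfsStep g H W c.1 c.2 (v, qs, cnt, oil))

def solution (land : List (List Int)) : Int :=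
  let height : Int := land.length
  let width : Int := (land.headI).length
  let fuel := height.toNat * width.toNat + 1
  let st :=
    (PySem.List.pyRange 0 height 1).foldl (fun st x =>
      (PySem.List.pyRange 0 width 1).foldl
        (fun (st : List (List Bool) × List (PySem.Set Int × Int)) y =>
          if pvGet land x y ≠ 0 ∧ pvVis st.1 x y = false then
            let r := bfsLoop land height width fuel
              (pvMark st.1 x y, [(x, y)], 1, PySem.Set.ofList [y])
            (r.1, st.2 ++ [(r.2.2.2, r.2.2.1)])
          else st) st)
      (List.replicate height.toNat (List.replicate width.toNat false), [])
  let answer := st.2.foldl (fun ans e =>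
      e.1.foldl (fun (ans : List Int) yy => ans.set yy.toNat (ans.getD yy.toNat 0 + e.2)) ans)
    (List.replicate width.toNat (0 : Int))
  (PySem.List.max? answer (fun z => z)).getD 0

-- ===== PORT B =====
def pvNbrs (c : Int × Int) : List (Int × Int) :=
  [(c.1, c.2 + 1), (c.1, c.2 - 1), (c.1 + 1, c.2), (c.1 - 1, c.2)]

-- one neighbour candidate of B's inner loop
def pairStep (g : List (List Int)) (H W : Int)
    (s : List (List Bool) × List (Int × Int)) (n : Int × Int) :
    List (List Bool) × List (Int × Int) :=
  if 0 ≤ n.1 ∧ n.1 < H ∧ 0 ≤ n.2 ∧ n.2 < W ∧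
      pvVis s.1 n.1 n.2 = false ∧ pvGet g n.1 n.2 = 1 then
    (pvMark s.1 n.1 n.2, s.2 ++ [n])
  else s

def cellStep (g : List (List Int)) (H W : Int)
    (s : List (List Bool) × List (Int × Int)) (c : Int × Int) :
    List (List Bool) × List (Int × Int) :=
  (pvNbrs c).foldl (pairStep g H W) s

-- one round: scan a snapshot of comp, collect newly claimed cells
def satRound (g : List (List Int)) (H W : Int) (comp : List (Int × Int))
    (v : List (List Bool)) : List (List Bool) × List (Int × Int) :=
  comp.foldl (cellStep g H W) (v, [])

-- B's while grew loop; fuel only makes the recursion total (H*W+1 always suffices)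
def satLoop (g : List (List Int)) (H W : Int) :
    Nat → List (List Bool) → List (Int × Int) → List (List Bool) × List (Int × Int)
  | 0, v, comp => (v, comp)
  | fuel + 1, v, comp =>
    let r := satRound g H W comp v
    if r.2.isEmpty then (r.1, comp)
    else satLoop g H W fuel r.1 (comp ++ r.2)

def solution_alt (land : List (List Int)) : Int :=
  let height : Int := land.length
  let width : Int := (land.headI).length
  let fuel := height.toNat * width.toNat + 1
  let st :=
    (PySem.List.pyRange 0 height 1).foldl (fun st x =>
      (PySem.List.pyRange 0 width 1).foldl
        (fun (st : List (List Bool) × List Int) y =>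
          if pvGet land x y ≠ 0 ∧ pvVis st.1 x y = false then
            let r := satLoop land height width fuel (pvMark st.1 x y) [(x, y)]
            let cols : PySem.Set Int := PySem.Set.ofList (r.2.map Prod.snd)
            (r.1, cols.foldl (fun (ans : List Int) yy =>
              ans.set yy.toNat (ans.getD yy.toNat 0 + (r.2.length : Int))) st.2)
          else st) st)
      (List.replicate height.toNat (List.replicate width.toNat false),
       List.replicate width.toNat (0 : Int))
  let answer := st.2
  (PySem.List.max? answer (fun z => z)).getD 0

-- ===== PRECONDITION & SPEC =====
-- Pre_ excludes exactly the inputs where A raises: an empty grid (IndexError on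
-- land[0]), a grid whose first row is empty (max() over an empty answer list
-- raises ValueError) and grids with some row shorter than the first row
-- (IndexError during the scan); B raises on the same inputs.
def Pre_solution (land : List (List Int)) : Prop :=
  land ≠ [] ∧ 0 < (land.headI).length ∧ ∀ r ∈ land, (land.headI).length ≤ r.length
instance (land : List (List Int)) : Decidable (Pre_solution land) := by
  unfold Pre_solution; infer_instance

def pvWitness_solution : List (List Int) := [[1, 0], [1, 1]]

def Spec_solution (land : List (List Int)) (out : Int) : Prop := out = solution_alt land
instance (land : List (List Int)) (out : Int) : Decidable (Spec_solution land out) := by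
  unfold Spec_solution; infer_instance

-- ===== CLAIM (what is proved, stated in full; the proofs are below) =====
def Claim_equal_solution : Prop :=
  ∀ (land : List (List Int)), Dom_solution land → Pre_solution land →
    Spec_solution land (solution land)

-- ===== LEMMAS AND PROOFS =====

-- abstract view of grids/matrices used only by the proofs
def pvInb (H W : Int) (c : Int × Int) : Prop := 0 ≤ c.1 ∧ c.1 < H ∧ 0 ≤ c.2 ∧ c.2 < W
def pvShape (H W : Int) (v : List (List Bool)) : Prop :=
  v.length = H.toNat ∧ ∀ r ∈ v, r.length = W.toNat
def pvCf (v : List (List Bool)) : Nat := (v.map (fun r => r.count false)).sum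
def pvAdj (b c : Int × Int) : Prop :=
  c = (b.1, b.2 + 1) ∨ c = (b.1, b.2 - 1) ∨ c = (b.1 + 1, b.2) ∨ c = (b.1 - 1, b.2)
def pvOk (g : List (List Int)) (H W : Int) (v : List (List Bool)) (c : Int × Int) : Prop :=
  pvInb H W c ∧ pvVis v c.1 c.2 = false ∧ pvGet g c.1 c.2 = 1

inductive pvPth (g : List (List Int)) (H W : Int) (v : List (List Bool)) :
    (Int × Int) → (Int × Int) → Prop
  | refl (a : Int × Int) : pvPth g H W v a a
  | tail {a b c : Int × Int} : pvPth g H W v a b → pvAdj b c → pvOk g H W v c →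
      pvPth g H W v a c

def pvRch (g : List (List Int)) (H W : Int) (v : List (List Bool))
    (Q : List (Int × Int)) (c : Int × Int) : Prop :=
  ∃ q ∈ Q, pvPth g H W v q c

-- generic getD/set helpers (no Mathlib lemma in this exact getD form)
lemma pvGetD_set_ne {α : Type} (l : List α) (i : Nat) (a : α) (j : Nat) (d : α) (h : j ≠ i) :
    (l.set i a).getD j d = l.getD j d := by
  simp [List.getD, List.getElem?_set_ne (Ne.symm h)]

lemma pvGetD_set_self {α : Type} (l : List α) (i : Nat) (a : α) (d : α) (h : i < l.length) :
    (l.set i a).getD i d = a := by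
  simp [List.getD, h]

lemma pvSum_set (l : List Nat) (i : Nat) (a : Nat) (h : i < l.length) :
    (l.set i a).sum + l[i] = l.sum + a := by
  induction l generalizing i with
  | nil => simp at h
  | cons x xs ih =>
    cases i with
    | zero => simp [List.set]; omega
    | succ n =>
      simp only [List.set, List.sum_cons, List.getElem_cons_succ]
      have := ih n (by simpa using h)
      omega

lemma pvCount_set_false (r : List Bool) (j : Nat) (h : j < r.length) (hf : r[j] = false) :
    (r.set j true).count false + 1 = r.count false := by
  induction r generalizing j with
  | nil => simp at h
  | cons x xs ih =>
    cases j with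
    | zero => simp_all
    | succ n =>
      simp only [List.set, List.count_cons]
      have := ih n (by simpa using h) (by simpa using hf)
      omega

lemma pvShape_rowlen {H W : Int} {v : List (List Bool)} (hS : pvShape H W v)
    {i : Nat} (hi : i < v.length) : (v.getD i []).length = W.toNat := by
  have : v.getD i [] = v[i] := by simp [List.getD, hi]
  rw [this]
  exact hS.2 _ (List.getElem_mem hi)

lemma pvVis_mark {H W : Int} {v : List (List Bool)} (hS : pvShape H W v)
    {x y : Int} (hx : pvInb H W (x, y)) (a b : Int) (hab : pvInb H W (a, b)) :
    pvVis (pvMark v x y) a b = true ↔ (pvVis v a b = true ∨ (a = x ∧ b = y)) := by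
  obtain ⟨hx0, hx1, hy0, hy1⟩ := hx
  obtain ⟨ha0, ha1, hb0, hb1⟩ := hab
  simp only at hx0 hx1 hy0 hy1 ha0 ha1 hb0 hb1
  have hv1 : v.length = H.toNat := hS.1
  have hxv : x.toNat < v.length := by omega
  have hav : a.toNat < v.length := by omega
  unfold pvMark pvVis
  by_cases hrow : a.toNat = x.toNat
  · have hax : a = x := by omega
    subst hax
    rw [pvGetD_set_self _ _ _ _ hxv]
    have hjw : y.toNat < (v.getD a.toNat []).length := by
      rw [pvShape_rowlen hS hav]; omega
    by_cases hcol : b.toNat = y.toNat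
    · have hby : b = y := by omega
      subst hby
      rw [pvGetD_set_self _ _ _ _ hjw]
      simp
    · rw [pvGetD_set_ne _ _ _ _ _ hcol]
      have hby : ¬(b = y) := by omega
      simp [hby]
  · rw [pvGetD_set_ne _ _ _ _ _ hrow]
    have hax : ¬(a = x) := by omega
    simp [hax]

lemma pvShape_mark {H W : Int} {v : List (List Bool)} (hS : pvShape H W v)
    {x y : Int} (hx : pvInb H W (x, y)) : pvShape H W (pvMark v x y) := by
  obtain ⟨hx0, hx1, hy0, hy1⟩ := hx
  simp only at hx0 hx1 hy0 hy1
  have hv1 : v.length = H.toNat := hS.1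
  have hxv : x.toNat < v.length := by omega
  constructor
  · simp only [pvMark, List.length_set]; exact hS.1
  · intro r hr
    rcases List.mem_or_eq_of_mem_set hr with h | h
    · exact hS.2 _ h
    · subst h
      rw [List.length_set, pvShape_rowlen hS hxv]

lemma pvCf_mark {H W : Int} {v : List (List Bool)} (hS : pvShape H W v)
    {x y : Int} (hx : pvInb H W (x, y)) (hvis : pvVis v x y = false) :
    pvCf (pvMark v x y) + 1 = pvCf v := by
  obtain ⟨hx0, hx1, hy0, hy1⟩ := hx
  simp only at hx0 hx1 hy0 hy1
  have hv1 : v.length = H.toNat := hS.1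
  have hxv : x.toNat < v.length := by omega
  have hjw : y.toNat < (v.getD x.toNat []).length := by
    rw [pvShape_rowlen hS hxv]; omega
  have hentry : (v.getD x.toNat [])[y.toNat] = false := by
    have h2 : (v.getD x.toNat []).getD y.toNat false = false := hvis
    rwa [List.getD_eq_getElem _ _ hjw] at h2
  unfold pvCf pvMark
  rw [List.map_set]
  have hlen : x.toNat < (v.map (fun r => r.count false)).length := by simpa using hxv
  have hset := pvSum_set (v.map (fun r => r.count false)) x.toNat
    (((v.getD x.toNat []).set y.toNat true).count false) hlen
  have hgetm : (v.map (fun r => r.count false))[x.toNat] = (v.getD x.toNat []).count false := by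
    rw [List.getD_eq_getElem _ _ hxv]; simp
  rw [hgetm] at hset
  have hcnt := pvCount_set_false (v.getD x.toNat []) y.toNat hjw hentry
  omega

lemma pvMatEq {H W : Int} {u w : List (List Bool)} (hu : pvShape H W u) (hw : pvShape H W w)
    (h : ∀ a b : Int, pvInb H W (a, b) → pvVis u a b = pvVis w a b) : u = w := by
  apply List.ext_getElem (by rw [hu.1, hw.1])
  intro i hi hi'
  apply List.ext_getElem
  · rw [hu.2 _ (List.getElem_mem hi), hw.2 _ (List.getElem_mem hi')]
  intro j hj hj'
  have hiH : (i : Int) < H := by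
    have := hu.1; omega
  have hjW : (j : Int) < W := by
    have := hu.2 _ (List.getElem_mem hi); omega
  have := h i j ⟨by positivity, hiH, by positivity, hjW⟩
  unfold pvVis at this
  simp only [Int.toNat_natCast] at this
  have hurow : u.getD i [] = u[i] := List.getD_eq_getElem _ _ hi
  have hwrow : w.getD i [] = w[i] := List.getD_eq_getElem _ _ hi'
  rw [hurow, hwrow, List.getD_eq_getElem _ _ hj, List.getD_eq_getElem _ _ hj'] at this
  exact this



lemma pvRch_nil {g : List (List Int)} {H W : Int} {v : List (List Bool)} {c : Int × Int} :
    ¬ pvRch g H W v [] c := by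
  rintro ⟨q, hq, -⟩; exact (List.not_mem_nil) hq

lemma pvPth_src {g : List (List Int)} {H W : Int} {v : List (List Bool)} {a c : Int × Int}
    (p : pvPth g H W v a c) : c = a ∨ pvOk g H W v c := by
  cases p with
  | refl => exact Or.inl rfl
  | tail p hadj hok => exact Or.inr hok

lemma pvPth_trans {g : List (List Int)} {H W : Int} {v : List (List Bool)} {a b c : Int × Int}
    (p : pvPth g H W v a b) (q : pvPth g H W v b c) : pvPth g H W v a c := by
  induction q with
  | refl => exact p
  | tail q hadj hok ih => exact (ih).tail hadj hok

lemma pvPth_mono {g : List (List Int)} {H W : Int} {v v' : List (List Bool)}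
    (hsub : ∀ c : Int × Int, pvInb H W c → pvVis v c.1 c.2 = true → pvVis v' c.1 c.2 = true)
    {a c : Int × Int} (p : pvPth g H W v' a c) : pvPth g H W v a c := by
  induction p with
  | refl => exact pvPth.refl _
  | @tail b' c' p hadj hok ih =>
    refine ih.tail hadj ⟨hok.1, ?_, hok.2.2⟩
    by_cases h : pvVis v c'.1 c'.2 = true
    · exact absurd (hsub _ hok.1 h) (by simp [hok.2.1])
    · simpa using h

lemma pvCrux (g : List (List Int)) (H W : Int) (v v' : List (List Bool))
    (Q Q' D : List (Int × Int))
    (hvch : ∀ c : Int × Int, pvInb H W c →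
      (pvVis v' c.1 c.2 = true ↔ (pvVis v c.1 c.2 = true ∨ c ∈ D)))
    (hD : ∀ d ∈ D, pvOk g H W v d ∧ ∃ b ∈ Q, pvAdj b d)
    (hRem : ∀ q ∈ Q, q ∉ Q' → ∀ c, pvAdj q c → pvOk g H W v c → c ∈ D)
    (hQ'sub : ∀ a ∈ Q', a ∈ D ∨ a ∈ Q)
    (hDQ' : ∀ d ∈ D, d ∈ Q')
    (hQ : ∀ q ∈ Q, pvInb H W q ∧ pvVis v q.1 q.2 = true) :
    ∀ c, pvInb H W c →
      ((pvVis v c.1 c.2 = true ∨ pvRch g H W v Q c) ↔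
        (pvVis v' c.1 c.2 = true ∨ pvRch g H W v' Q' c)) := by
  have hsub : ∀ c : Int × Int, pvInb H W c → pvVis v c.1 c.2 = true → pvVis v' c.1 c.2 = true :=
    fun c hc h => (hvch c hc).mpr (Or.inl h)
  intro c hc
  constructor
  · rintro (h | ⟨a, ha, p⟩)
    · exact Or.inl (hsub c hc h)
    · -- induction over the path from a ∈ Q
      clear hc
      induction p with
      | refl =>
        exact Or.inl (hsub a (hQ a ha).1 (hQ a ha).2)
      | @tail b' c' p hadj hok ih =>
        by_cases hcD : c' ∈ D
        · exact Or.inl ((hvch c' hok.1).mpr (Or.inr hcD))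
        · have hOk' : pvOk g H W v' c' := by
            refine ⟨hok.1, ?_, hok.2.2⟩
            by_cases h : pvVis v' c'.1 c'.2 = true
            · rcases (hvch c' hok.1).mp h with h2 | h2
              · exact absurd h2 (by simp [hok.2.1])
              · exact absurd h2 hcD
            · simpa using h
          rcases ih with hvb | ⟨q', hq', pb⟩
          · -- b' already visited in v'
            rcases pvPth_src p with rfl | hokb
            · -- b' = a ∈ Q
              by_cases haQ' : b' ∈ Q'
              · exact Or.inr ⟨b', haQ', (pvPth.refl _).tail hadj hOk'⟩
              · exact absurd (hRem b' ha haQ' c' hadj hok) hcD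
            · -- b' unvisited in v but visited in v' ⇒ b' ∈ D ⊆ Q'
              rcases (hvch b' hokb.1).mp hvb with h2 | h2
              · exact absurd h2 (by simp [hokb.2.1])
              · exact Or.inr ⟨b', hDQ' b' h2, (pvPth.refl _).tail hadj hOk'⟩
          · exact Or.inr ⟨q', hq', pb.tail hadj hOk'⟩
  · rintro (h | ⟨a, ha, p⟩)
    · rcases (hvch c hc).mp h with h2 | h2
      · exact Or.inl h2
      · obtain ⟨hok, b, hb, hadj⟩ := hD c h2
        exact Or.inr ⟨b, hb, (pvPth.refl _).tail hadj hok⟩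
    · have p' : pvPth g H W v a c := pvPth_mono hsub p
      rcases hQ'sub a ha with haD | haQ
      · obtain ⟨hok, b, hb, hadj⟩ := hD a haD
        exact Or.inr ⟨b, hb, pvPth_trans ((pvPth.refl _).tail hadj hok) p'⟩
      · exact Or.inr ⟨a, haQ, p'⟩

lemma pvClosed {g : List (List Int)} {H W : Int} {v : List (List Bool)} {Q : List (Int × Int)}
    (hQ : ∀ q ∈ Q, pvInb H W q ∧ pvVis v q.1 q.2 = true)
    (hcl : ∀ b ∈ Q, ∀ c, pvAdj b c → ¬ pvOk g H W v c) :
    ∀ c, pvRch g H W v Q c → pvVis v c.1 c.2 = true := by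
  rintro c ⟨a, ha, p⟩
  induction p with
  | refl => exact (hQ a ha).2
  | @tail b' c' p hadj hok ih =>
    rcases pvPth_src p with rfl | hokb
    · exact absurd hok (hcl b' ha c' hadj)
    · exact absurd ih (by simp [hokb.2.1])


lemma pvMem_nbrs {c n : Int × Int} : n ∈ pvNbrs c ↔ pvAdj c n := by
  simp [pvNbrs, pvAdj]

lemma pairStep_spec (g : List (List Int)) (H W : Int) (v0 : List (List Bool))
    {v : List (List Bool)} {D : List (Int × Int)} (n : Int × Int)
    (hS : pvShape H W v)
    (hch : ∀ c : Int × Int, pvInb H W c →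
      (pvVis v c.1 c.2 = true ↔ pvVis v0 c.1 c.2 = true ∨ c ∈ D))
    (hD : ∀ d ∈ D, pvOk g H W v0 d)
    (hcf : pvCf v + D.length = pvCf v0) :
    pvShape H W (pairStep g H W (v, D) n).1 ∧
    (∀ c : Int × Int, pvInb H W c →
      (pvVis (pairStep g H W (v, D) n).1 c.1 c.2 = true ↔
        pvVis v0 c.1 c.2 = true ∨ c ∈ (pairStep g H W (v, D) n).2)) ∧
    (∀ d ∈ (pairStep g H W (v, D) n).2, pvOk g H W v0 d ∧ (d ∈ D ∨ d = n)) ∧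
    pvCf (pairStep g H W (v, D) n).1 + (pairStep g H W (v, D) n).2.length = pvCf v0 ∧
    (∃ E, (pairStep g H W (v, D) n).2 = D ++ E) ∧
    (pvOk g H W v0 n → n ∈ (pairStep g H W (v, D) n).2) := by
  by_cases hg : 0 ≤ n.1 ∧ n.1 < H ∧ 0 ≤ n.2 ∧ n.2 < W ∧
      pvVis v n.1 n.2 = false ∧ pvGet g n.1 n.2 = 1
  · have hInb : pvInb H W (n.1, n.2) := ⟨hg.1, hg.2.1, hg.2.2.1, hg.2.2.2.1⟩
    have hInb' : pvInb H W n := hInb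
    have hvfalse : pvVis v n.1 n.2 = false := hg.2.2.2.2.1
    have hv0false : pvVis v0 n.1 n.2 = false := by
      by_cases h0 : pvVis v0 n.1 n.2 = true
      · exact absurd ((hch n hInb').mpr (Or.inl h0)) (by simp [hvfalse])
      · simpa using h0
    have hstep : pairStep g H W (v, D) n = (pvMark v n.1 n.2, D ++ [n]) := by
      simp only [pairStep, if_pos hg]
    rw [hstep]
    refine ⟨pvShape_mark hS hInb, ?_, ?_, ?_, ⟨[n], rfl⟩, by simp⟩
    · intro c hc
      simp only
      have hmk := pvVis_mark hS hInb c.1 c.2 hc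
      rw [hmk]
      constructor
      · rintro (h | ⟨h1, h2⟩)
        · rcases (hch c hc).mp h with h' | h'
          · exact Or.inl h'
          · exact Or.inr (by simp [h'])
        · exact Or.inr (by simp [List.mem_append]; right; exact Prod.ext_iff.mpr ⟨h1, h2⟩)
      · rintro (h | h)
        · exact Or.inl ((hch c hc).mpr (Or.inl h))
        · rcases List.mem_append.mp h with h' | h'
          · exact Or.inl ((hch c hc).mpr (Or.inr h'))
          · have : c = n := by simpa using h'
            subst this
            exact Or.inr ⟨rfl, rfl⟩
    · intro d hd
      rcases List.mem_append.mp hd with h | h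
      · exact ⟨hD d h, Or.inl h⟩
      · have : d = n := by simpa using h
        subst this
        exact ⟨⟨hInb', hv0false, hg.2.2.2.2.2⟩, Or.inr rfl⟩
    · have := pvCf_mark hS hInb hvfalse
      simp only [List.length_append, List.length_cons, List.length_nil]
      omega
  · have hstep : pairStep g H W (v, D) n = (v, D) := by
      simp only [pairStep, if_neg hg]
    rw [hstep]
    refine ⟨hS, hch, fun d hd => ⟨hD d hd, Or.inl hd⟩, hcf, ⟨[], by simp⟩, ?_⟩
    intro hok
    obtain ⟨⟨h1, h2, h3, h4⟩, hv0, hget⟩ := hok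
    have hv : pvVis v n.1 n.2 = true := by
      by_contra h
      exact hg ⟨h1, h2, h3, h4, by simpa using h, hget⟩
    rcases (hch n ⟨h1, h2, h3, h4⟩).mp hv with h | h
    · exact absurd h (by simp [hv0])
    · exact h

lemma pairFold_spec (g : List (List Int)) (H W : Int) (v0 : List (List Bool)) :
    ∀ (ns : List (Int × Int)) (v : List (List Bool)) (D : List (Int × Int)),
    pvShape H W v →
    (∀ c : Int × Int, pvInb H W c →
      (pvVis v c.1 c.2 = true ↔ pvVis v0 c.1 c.2 = true ∨ c ∈ D)) →
    (∀ d ∈ D, pvOk g H W v0 d) →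
    pvCf v + D.length = pvCf v0 →
    pvShape H W (ns.foldl (pairStep g H W) (v, D)).1 ∧
    (∀ c : Int × Int, pvInb H W c →
      (pvVis (ns.foldl (pairStep g H W) (v, D)).1 c.1 c.2 = true ↔
        pvVis v0 c.1 c.2 = true ∨ c ∈ (ns.foldl (pairStep g H W) (v, D)).2)) ∧
    (∀ d ∈ (ns.foldl (pairStep g H W) (v, D)).2, pvOk g H W v0 d ∧ (d ∈ D ∨ d ∈ ns)) ∧
    pvCf (ns.foldl (pairStep g H W) (v, D)).1 + (ns.foldl (pairStep g H W) (v, D)).2.length = pvCf v0 ∧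
    (∃ E, (ns.foldl (pairStep g H W) (v, D)).2 = D ++ E) ∧
    (∀ n ∈ ns, pvOk g H W v0 n → n ∈ (ns.foldl (pairStep g H W) (v, D)).2) := by
  intro ns
  induction ns with
  | nil =>
    intro v D hS hch hD hcf
    exact ⟨hS, hch, fun d hd => ⟨hD d hd, Or.inl hd⟩, hcf, ⟨[], by simp⟩, by simp⟩
  | cons n ns ih =>
    intro v D hS hch hD hcf
    obtain ⟨hS1, hch1, hD1, hcf1, ⟨E1, hE1⟩, hn1⟩ := pairStep_spec g H W v0 n hS hch hD hcf
    simp only [List.foldl_cons]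
    obtain ⟨rS, rch, rD, rcf, ⟨E2, hE2⟩, rcm⟩ :=
      ih (pairStep g H W (v, D) n).1 (pairStep g H W (v, D) n).2 hS1
        (by
          intro c hc
          have := hch1 c hc
          simpa using this)
        (fun d hd => (hD1 d hd).1) hcf1
    have hpair : ((pairStep g H W (v, D) n).1, (pairStep g H W (v, D) n).2) =
        pairStep g H W (v, D) n := rfl
    rw [hpair] at rS rch rD rcf hE2 rcm
    refine ⟨rS, rch, ?_, rcf, ⟨E1 ++ E2, by rw [hE2, hE1, List.append_assoc]⟩, ?_⟩
    · intro d hd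
      rcases rD d hd with ⟨hok, h | h⟩
      · rcases (hD1 d h).2 with h' | h'
        · exact ⟨hok, Or.inl h'⟩
        · exact ⟨hok, Or.inr (by simp [h'])⟩
      · exact ⟨hok, Or.inr (by simp [h])⟩
    · intro m hm hok
      rcases List.mem_cons.mp hm with rfl | hmem
      · have := hn1 hok
        rw [hE2]
        exact List.mem_append.mpr (Or.inl this)
      · exact rcm m hmem hok

lemma satRound_spec (g : List (List Int)) (H W : Int) (v0 : List (List Bool))
    (allc : List (Int × Int)) :
    ∀ (comp : List (Int × Int)) (v : List (List Bool)) (D : List (Int × Int)),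
    (∀ b ∈ comp, b ∈ allc) →
    pvShape H W v →
    (∀ c : Int × Int, pvInb H W c →
      (pvVis v c.1 c.2 = true ↔ pvVis v0 c.1 c.2 = true ∨ c ∈ D)) →
    (∀ d ∈ D, pvOk g H W v0 d ∧ ∃ b ∈ allc, pvAdj b d) →
    pvCf v + D.length = pvCf v0 →
    pvShape H W (comp.foldl (cellStep g H W) (v, D)).1 ∧
    (∀ c : Int × Int, pvInb H W c →
      (pvVis (comp.foldl (cellStep g H W) (v, D)).1 c.1 c.2 = true ↔
        pvVis v0 c.1 c.2 = true ∨ c ∈ (comp.foldl (cellStep g H W) (v, D)).2)) ∧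
    (∀ d ∈ (comp.foldl (cellStep g H W) (v, D)).2,
      pvOk g H W v0 d ∧ ∃ b ∈ allc, pvAdj b d) ∧
    pvCf (comp.foldl (cellStep g H W) (v, D)).1 +
      (comp.foldl (cellStep g H W) (v, D)).2.length = pvCf v0 ∧
    (∃ E, (comp.foldl (cellStep g H W) (v, D)).2 = D ++ E) ∧
    (∀ b ∈ comp, ∀ n, pvAdj b n → pvOk g H W v0 n →
      n ∈ (comp.foldl (cellStep g H W) (v, D)).2) := by
  intro comp
  induction comp with
  | nil =>
    intro v D hsub hS hch hD hcf
    exact ⟨hS, hch, by simpa using hD, hcf, ⟨[], by simp⟩, by simp⟩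
  | cons b comp ih =>
    intro v D hsub hS hch hD hcf
    obtain ⟨hS1, hch1, hD1, hcf1, ⟨E1, hE1⟩, hn1⟩ :=
      pairFold_spec g H W v0 (pvNbrs b) v D hS hch (fun d hd => (hD d hd).1) hcf
    simp only [List.foldl_cons]
    have hcell : cellStep g H W (v, D) b = (pvNbrs b).foldl (pairStep g H W) (v, D) := rfl
    rw [hcell]
    set s1 := (pvNbrs b).foldl (pairStep g H W) (v, D) with hs1
    obtain ⟨rS, rch, rD, rcf, ⟨E2, hE2⟩, rcm⟩ :=
      ih s1.1 s1.2 (fun b' hb' => hsub b' (List.mem_cons_of_mem _ hb'))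
        hS1 (by intro c hc; simpa using hch1 c hc)
        (by
          intro d hd
          rcases hD1 d hd with ⟨hok, h | h⟩
          · obtain ⟨-, b', hb', hadj⟩ := hD d h
            exact ⟨hok, b', hb', hadj⟩
          · exact ⟨hok, b, hsub b List.mem_cons_self, pvMem_nbrs.mp h⟩)
        hcf1
    have hpair : (s1.1, s1.2) = s1 := rfl
    rw [hpair] at rS rch rD rcf hE2 rcm
    refine ⟨rS, rch, ?_, rcf, ⟨E1 ++ E2, by rw [hE2, hE1, List.append_assoc]⟩, ?_⟩
    · intro d hd
      rcases rD d hd with ⟨hok, b', hb', hadj⟩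
      exact ⟨hok, b', hb', hadj⟩
    · intro b' hb' n hadj hok
      rcases List.mem_cons.mp hb' with rfl | hmem
      · have : n ∈ s1.2 := hn1 n (pvMem_nbrs.mpr hadj) hok
        rw [hE2]
        exact List.mem_append.mpr (Or.inl this)
      · exact rcm b' hmem n hadj hok


lemma satLoop_spec (g : List (List Int)) (H W : Int) :
    ∀ (fuel : Nat) (v : List (List Bool)) (comp : List (Int × Int)),
    pvShape H W v →
    (∀ q ∈ comp, pvInb H W q ∧ pvVis v q.1 q.2 = true) →
    pvCf v + 1 ≤ fuel →
    pvShape H W (satLoop g H W fuel v comp).1 ∧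
    (∀ c : Int × Int, pvInb H W c →
      (pvVis (satLoop g H W fuel v comp).1 c.1 c.2 = true ↔
        pvVis v c.1 c.2 = true ∨ pvRch g H W v comp c)) ∧
    (satLoop g H W fuel v comp).2.length + pvCf (satLoop g H W fuel v comp).1 =
      comp.length + pvCf v ∧
    (∀ c : Int × Int, c ∈ (satLoop g H W fuel v comp).2 ↔ c ∈ comp ∨
      (pvInb H W c ∧ pvVis v c.1 c.2 = false ∧
        pvVis (satLoop g H W fuel v comp).1 c.1 c.2 = true)) := by
  intro fuel
  induction fuel with
  | zero => intro v comp hS hQ hfuel; omega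
  | succ fuel ih =>
    intro v comp hS hQ hfuel
    obtain ⟨rS, rch, rD, rcf, ⟨E, hE⟩, rcm⟩ :=
      satRound_spec g H W v comp comp v [] (fun b hb => hb) hS (by simp) (by simp) (by simp)
    have hround : satRound g H W comp v = comp.foldl (cellStep g H W) (v, []) := rfl
    rw [← hround] at rS rch rD rcf rcm
    set r := satRound g H W comp v with hr
    by_cases hem : r.2.isEmpty
    · have hD0 : r.2 = [] := List.isEmpty_iff.mp hem
      have hveq : r.1 = v := by
        apply pvMatEq rS hS
        intro a b hab
        have h2 := rch (a, b) hab
        rw [hD0] at h2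
        simp only [List.not_mem_nil, or_false] at h2
        by_cases h : pvVis r.1 a b = true
        · rw [h, h2.mp h]
        · have hx1 : pvVis r.1 a b = false := by simpa using h
          have hx2 : pvVis v a b = false := by
            by_cases h3 : pvVis v a b = true
            · exact absurd (h2.mpr h3) h
            · simpa using h3
          rw [hx1, hx2]
      have hloop : satLoop g H W (fuel + 1) v comp = (r.1, comp) := by
        simp only [satLoop, ← hr, hem, if_pos]
      rw [hloop]
      have hclosed : ∀ c, pvRch g H W v comp c → pvVis v c.1 c.2 = true := by
        apply pvClosed hQ
        intro b hb c hadj hok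
        have := rcm b hb c hadj hok
        rw [hD0] at this
        simp at this
      refine ⟨by rwa [hveq], ?_, by rw [hveq], ?_⟩
      · intro c hc
        rw [hveq]
        constructor
        · exact fun h => Or.inl h
        · rintro (h | h)
          · exact h
          · exact hclosed c h
      · intro c
        rw [hveq]
        constructor
        · exact fun h => Or.inl h
        · rintro (h | ⟨-, h1, h2⟩)
          · exact h
          · rw [h1] at h2; exact absurd h2 (by simp)
    · have hD := List.isEmpty_eq_false_iff.mp (by simpa using hem)
      have hDlen : 1 ≤ r.2.length := by
        cases h : r.2 with
        | nil => exact absurd h hD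
        | cons a l => simp
      have hloop : satLoop g H W (fuel + 1) v comp = satLoop g H W fuel r.1 (comp ++ r.2) := by
        simp only [satLoop, ← hr, hem]
        simp
      rw [hloop]
      have hmono : ∀ c : Int × Int, pvInb H W c → pvVis v c.1 c.2 = true →
          pvVis r.1 c.1 c.2 = true := fun c hc h => (rch c hc).mpr (Or.inl h)
      have hQ' : ∀ q ∈ comp ++ r.2, pvInb H W q ∧ pvVis r.1 q.1 q.2 = true := by
        intro q hq
        rcases List.mem_append.mp hq with h | h
        · exact ⟨(hQ q h).1, hmono q (hQ q h).1 (hQ q h).2⟩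
        · obtain ⟨hok, -⟩ := rD q h
          exact ⟨hok.1, (rch q hok.1).mpr (Or.inr h)⟩
      have hfuel' : pvCf r.1 + 1 ≤ fuel := by omega
      obtain ⟨sS, sch, scf, scm⟩ := ih r.1 (comp ++ r.2) rS hQ' hfuel'
      have hcrux := pvCrux g H W v r.1 comp (comp ++ r.2) r.2 rch rD
        (fun q hq hq' => absurd (List.mem_append.mpr (Or.inl hq)) hq')
        (fun a ha => (List.mem_append.mp ha).symm.imp id id)
        (fun d hd => List.mem_append.mpr (Or.inr hd)) hQ
      refine ⟨sS, ?_, ?_, ?_⟩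
      · intro c hc
        rw [sch c hc]
        have h1 := hcrux c hc
        constructor
        · rintro h
          exact (h1.mpr (Or.imp id id h)).elim Or.inl Or.inr
        · rintro h
          exact (h1.mp h).elim Or.inl Or.inr
      · rw [scf]
        simp only [List.length_append]
        omega
      · intro c
        rw [scm c]
        constructor
        · rintro (h | ⟨hInb, h1, h2⟩)
          · rcases List.mem_append.mp h with h' | h'
            · exact Or.inl h'
            · obtain ⟨hok, -⟩ := rD c h'
              refine Or.inr ⟨hok.1, hok.2.1, ?_⟩
              exact (sch c hok.1).mpr (Or.inl ((rch c hok.1).mpr (Or.inr h')))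
          · refine Or.inr ⟨hInb, ?_, h2⟩
            by_cases h3 : pvVis v c.1 c.2 = true
            · exact absurd (hmono c hInb h3) (by simp [h1])
            · simpa using h3
        · rintro (h | ⟨hInb, h1, h2⟩)
          · exact Or.inl (List.mem_append.mpr (Or.inl h))
          · by_cases h3 : pvVis r.1 c.1 c.2 = true
            · rcases (rch c hInb).mp h3 with h4 | h4
              · exact absurd h4 (by simp [h1])
              · exact Or.inl (List.mem_append.mpr (Or.inr h4))
            · exact Or.inr ⟨hInb, by simpa using h3, h2⟩

lemma bfsStep_eq (g : List (List Int)) (H W cx cy : Int) (v : List (List Bool))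
    (qs : List (Int × Int)) (cnt : Int) (oil : PySem.Set Int) :
    bfsStep g H W cx cy (v, qs, cnt, oil) =
      ((cellStep g H W (v, []) (cx, cy)).1,
       qs ++ (cellStep g H W (v, []) (cx, cy)).2,
       cnt + ((cellStep g H W (v, []) (cx, cy)).2.length : Int),
       PySem.Set.update oil ((cellStep g H W (v, []) (cx, cy)).2.map Prod.snd)) := by
  have key : ∀ (ds : List (Int × Int)) (v : List (List Bool)) (D qs : List (Int × Int))
      (cnt : Int) (oil : PySem.Set Int),
      ds.foldl (fun st d =>
        if 0 ≤ cx + d.1 ∧ cx + d.1 < H ∧ 0 ≤ cy + d.2 ∧ cy + d.2 < W ∧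
            pvVis st.1 (cx + d.1) (cy + d.2) = false ∧ pvGet g (cx + d.1) (cy + d.2) = 1 then
          (pvMark st.1 (cx + d.1) (cy + d.2), st.2.1 ++ [(cx + d.1, cy + d.2)],
           st.2.2.1 + 1, PySem.Set.add st.2.2.2 (cy + d.2))
        else st)
        (v, qs ++ D, cnt + (D.length : Int), PySem.Set.update oil (D.map Prod.snd)) =
      let rr := (ds.map (fun d => (cx + d.1, cy + d.2))).foldl (pairStep g H W) (v, D)
      (rr.1, qs ++ rr.2, cnt + (rr.2.length : Int), PySem.Set.update oil (rr.2.map Prod.snd)) := by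
    intro ds
    induction ds with
    | nil => intro v D qs cnt oil; simp
    | cons d ds ihd =>
      intro v D qs cnt oil
      simp only [List.foldl_cons, List.map_cons]
      by_cases hg : 0 ≤ cx + d.1 ∧ cx + d.1 < H ∧ 0 ≤ cy + d.2 ∧ cy + d.2 < W ∧
          pvVis v (cx + d.1) (cy + d.2) = false ∧ pvGet g (cx + d.1) (cy + d.2) = 1
      · rw [if_pos hg]
        have hps : pairStep g H W (v, D) (cx + d.1, cy + d.2) =
            (pvMark v (cx + d.1) (cy + d.2), D ++ [(cx + d.1, cy + d.2)]) := by
          simp only [pairStep, if_pos (show (0 ≤ (cx + d.1, cy + d.2).1 ∧ _ ∧ _ ∧ _ ∧ _ ∧ _) from hg)]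
        rw [hps]
        have hst : (qs ++ D) ++ [(cx + d.1, cy + d.2)] = qs ++ (D ++ [(cx + d.1, cy + d.2)]) := by
          simp [List.append_assoc]
        have hcnt : cnt + (D.length : Int) + 1 =
            cnt + (((D ++ [(cx + d.1, cy + d.2)]).length : Nat) : Int) := by
          simp; omega
        have hoil : PySem.Set.add (PySem.Set.update oil (D.map Prod.snd)) (cy + d.2) =
            PySem.Set.update oil ((D ++ [(cx + d.1, cy + d.2)]).map Prod.snd) := by
          simp [PySem.Set.update, List.foldl_append]
        rw [hst, hcnt, hoil]
        exact ihd (pvMark v (cx + d.1) (cy + d.2)) (D ++ [(cx + d.1, cy + d.2)]) qs cnt oil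
      · rw [if_neg hg]
        have hps : pairStep g H W (v, D) (cx + d.1, cy + d.2) = (v, D) := by
          simp only [pairStep, if_neg (show ¬(0 ≤ (cx + d.1, cy + d.2).1 ∧ _ ∧ _ ∧ _ ∧ _ ∧ _) from hg)]
        rw [hps]
        exact ihd v D qs cnt oil
  have h0 := key bfsDirs v [] qs cnt oil
  simp only [List.append_nil, List.length_nil, Int.natCast_zero, add_zero, List.map_nil] at h0
  have hset : PySem.Set.update oil ([] : List Int) = oil := rfl
  rw [hset] at h0
  have hnbrs : bfsDirs.map (fun d => (cx + d.1, cy + d.2)) = pvNbrs (cx, cy) := by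
    simp [bfsDirs, pvNbrs]; constructor <;> ring
  rw [hnbrs] at h0
  exact h0


lemma bfsLoop_spec (g : List (List Int)) (H W : Int) :
    ∀ (fuel : Nat) (v : List (List Bool)) (que : List (Int × Int)) (cnt : Int)
      (oil : PySem.Set Int),
    pvShape H W v →
    (∀ q ∈ que, pvInb H W q ∧ pvVis v q.1 q.2 = true) →
    pvCf v + que.length ≤ fuel →
    pvShape H W (bfsLoop g H W fuel (v, que, cnt, oil)).1 ∧
    (∀ c : Int × Int, pvInb H W c →
      (pvVis (bfsLoop g H W fuel (v, que, cnt, oil)).1 c.1 c.2 = true ↔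
        pvVis v c.1 c.2 = true ∨ pvRch g H W v que c)) ∧
    (bfsLoop g H W fuel (v, que, cnt, oil)).2.2.1 +
      (pvCf (bfsLoop g H W fuel (v, que, cnt, oil)).1 : Int) = cnt + (pvCf v : Int) ∧
    (∀ z : Int, z ∈ (bfsLoop g H W fuel (v, que, cnt, oil)).2.2.2 ↔ z ∈ oil ∨
      ∃ c : Int × Int, pvInb H W c ∧ pvVis v c.1 c.2 = false ∧
        pvVis (bfsLoop g H W fuel (v, que, cnt, oil)).1 c.1 c.2 = true ∧ c.2 = z) ∧
    (List.Nodup oil → List.Nodup (bfsLoop g H W fuel (v, que, cnt, oil)).2.2.2) := by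
  intro fuel
  induction fuel with
  | zero =>
    intro v que cnt oil hS hQ hfuel
    have hq0 : que = [] := by
      cases que with
      | nil => rfl
      | cons a l => simp at hfuel
    subst hq0
    simp only [bfsLoop]
    refine ⟨hS, ?_, by simp, ?_, fun h => h⟩
    · intro c hc
      constructor
      · exact fun h => Or.inl h
      · rintro (h | h)
        · exact h
        · exact absurd h pvRch_nil
    · intro z
      constructor
      · exact fun h => Or.inl h
      · rintro (h | ⟨c, -, h1, h2, -⟩)
        · exact h
        · rw [h1] at h2; exact absurd h2 (by simp)
  | succ fuel ih =>
    intro v que cnt oil hS hQ hfuel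
    cases que with
    | nil =>
      simp only [bfsLoop]
      refine ⟨hS, ?_, by simp, ?_, fun h => h⟩
      · intro c hc
        constructor
        · exact fun h => Or.inl h
        · rintro (h | h)
          · exact h
          · exact absurd h pvRch_nil
      · intro z
        constructor
        · exact fun h => Or.inl h
        · rintro (h | ⟨c, -, h1, h2, -⟩)
          · exact h
          · rw [h1] at h2; exact absurd h2 (by simp)
    | cons q qs =>
      have hloop : bfsLoop g H W (fuel + 1) (v, q :: qs, cnt, oil) =
          bfsLoop g H W fuel (bfsStep g H W q.1 q.2 (v, qs, cnt, oil)) := rfl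
      rw [hloop, bfsStep_eq]
      have hqeta : (q.1, q.2) = q := rfl
      rw [hqeta]
      obtain ⟨hS1, hch1, hD1, hcf1, ⟨E, hE⟩, hcm1⟩ :=
        pairFold_spec g H W v (pvNbrs q) v [] hS (by simp) (by simp) (by simp)
      have hcell : cellStep g H W (v, []) q = (pvNbrs q).foldl (pairStep g H W) (v, []) := rfl
      rw [← hcell] at hS1 hch1 hD1 hcf1 hcm1
      set s1 := cellStep g H W (v, []) q with hs1
      set D := s1.2 with hDdef
      have hmono : ∀ c : Int × Int, pvInb H W c → pvVis v c.1 c.2 = true →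
          pvVis s1.1 c.1 c.2 = true := fun c hc h => (hch1 c hc).mpr (Or.inl h)
      have hQ1 : ∀ p ∈ qs ++ D, pvInb H W p ∧ pvVis s1.1 p.1 p.2 = true := by
        intro p hp
        rcases List.mem_append.mp hp with h | h
        · have := hQ p (List.mem_cons_of_mem _ h)
          exact ⟨this.1, hmono p this.1 this.2⟩
        · obtain ⟨hok, -⟩ := hD1 p h
          exact ⟨hok.1, (hch1 p hok.1).mpr (Or.inr h)⟩
      have hlen : pvCf s1.1 + (qs ++ D).length ≤ fuel := by
        simp only [List.length_append]
        simp only [List.length_cons] at hfuel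
        omega
      obtain ⟨sS, sch, scnt, soil, snd⟩ :=
        ih s1.1 (qs ++ D) (cnt + (D.length : Int)) (PySem.Set.update oil (D.map Prod.snd))
          hS1 hQ1 hlen
      have hcrux := pvCrux g H W v s1.1 (q :: qs) (qs ++ D) D hch1
        (by
          intro d hd
          obtain ⟨hok, h⟩ := hD1 d hd
          refine ⟨hok, q, List.mem_cons_self, ?_⟩
          rcases h with h | h
          · simp at h
          · exact pvMem_nbrs.mp h)
        (by
          intro q' hq' hnq' c hadj hok
          rcases List.mem_cons.mp hq' with rfl | h
          · exact hcm1 c (pvMem_nbrs.mpr hadj) hok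
          · exact absurd (List.mem_append.mpr (Or.inl h)) hnq')
        (fun a ha => (List.mem_append.mp ha).symm.imp id (List.mem_cons_of_mem _))
        (fun d hd => List.mem_append.mpr (Or.inr hd))
        hQ
      refine ⟨sS, ?_, ?_, ?_, fun h => snd (PySem.Set.nodup_update _ _ h)⟩
      · intro c hc
        rw [sch c hc]
        have h1 := hcrux c hc
        constructor
        · rintro h
          exact (h1.mpr (Or.imp id id h)).elim Or.inl Or.inr
        · rintro h
          exact (h1.mp h).elim Or.inl Or.inr
      · rw [scnt]; omega
      · intro z
        rw [soil z, PySem.Set.mem_update]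
        constructor
        · rintro ((h | h) | ⟨c, hInb, h1, h2, h3⟩)
          · exact Or.inl h
          · obtain ⟨c, hcD, rfl⟩ := List.mem_map.mp h
            obtain ⟨hok, -⟩ := hD1 c hcD
            refine Or.inr ⟨c, hok.1, hok.2.1, ?_, rfl⟩
            exact (sch c hok.1).mpr (Or.inl ((hch1 c hok.1).mpr (Or.inr hcD)))
          · refine Or.inr ⟨c, hInb, ?_, h2, h3⟩
            by_cases h4 : pvVis v c.1 c.2 = true
            · exact absurd (hmono c hInb h4) (by simp [h1])
            · simpa using h4
        · rintro (h | ⟨c, hInb, h1, h2, h3⟩)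
          · exact Or.inl (Or.inl h)
          · by_cases h4 : pvVis s1.1 c.1 c.2 = true
            · rcases (hch1 c hInb).mp h4 with h5 | h5
              · exact absurd h5 (by simp [h1])
              · exact Or.inl (Or.inr (List.mem_map.mpr ⟨c, h5, h3⟩))
            · exact Or.inr ⟨c, hInb, by simpa using h4, h2, h3⟩


lemma pvCf_le {H W : Int} {v : List (List Bool)} (hS : pvShape H W v) :
    pvCf v ≤ H.toNat * W.toNat := by
  unfold pvCf
  have h1 : ∀ x ∈ v.map (fun r => r.count false), x ≤ W.toNat := by
    intro x hx
    obtain ⟨r, hr, rfl⟩ := List.mem_map.mp hx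
    exact le_trans (List.count_le_length) (le_of_eq (hS.2 r hr))
  calc (v.map (fun r => r.count false)).sum
      ≤ (v.map (fun r => r.count false)).length • W.toNat := List.sum_le_card_nsmul _ _ h1
    _ = H.toNat * W.toNat := by simp [hS.1, smul_eq_mul]

lemma pvFoldAdd_length (k : Int) :
    ∀ (S : List Int) (ans : List Int),
      (S.foldl (fun (ans : List Int) yy => ans.set yy.toNat (ans.getD yy.toNat 0 + k)) ans).length
        = ans.length := by
  intro S
  induction S with
  | nil => intro ans; rfl
  | cons s S ih =>
    intro ans
    rw [List.foldl_cons, ih, List.length_set]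

lemma pvFoldAdd_getD (k : Int) :
    ∀ (S : List Int) (ans : List Int) (j : Nat),
      (∀ s ∈ S, 0 ≤ s ∧ s.toNat < ans.length) → j < ans.length →
      (S.foldl (fun (ans : List Int) yy => ans.set yy.toNat (ans.getD yy.toNat 0 + k)) ans).getD j 0
        = ans.getD j 0 + k * (S.count (j : Int) : Int) := by
  intro S
  induction S with
  | nil => intro ans j hb hj; simp
  | cons s S ih =>
    intro ans j hb hj
    rw [List.foldl_cons]
    have hbs := hb s List.mem_cons_self
    have hlen : (ans.set s.toNat (ans.getD s.toNat 0 + k)).length = ans.length :=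
      List.length_set ..
    have hrec := ih (ans.set s.toNat (ans.getD s.toNat 0 + k)) j
      (by intro t ht; rw [hlen]; exact hb t (List.mem_cons_of_mem _ ht)) (by omega)
    rw [hrec]
    by_cases hsj : s.toNat = j
    · have hs : s = (j : Int) := by omega
      have hget : (ans.set s.toNat (ans.getD s.toNat 0 + k)).getD j 0 = ans.getD s.toNat 0 + k := by
        rw [← hsj]
        exact pvGetD_set_self _ _ _ _ hbs.2
      rw [hget, hsj]
      have hcnt : (s :: S).count ((j : Nat) : Int) = S.count ((j : Nat) : Int) + 1 := by
        rw [List.count_cons]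
        simp [hs]
      rw [hcnt]
      push_cast
      ring
    · rw [pvGetD_set_ne _ _ _ _ _ (fun h => hsj h.symm)]
      have hcnt : (s :: S).count ((j : Nat) : Int) = S.count ((j : Nat) : Int) := by
        rw [List.count_cons]
        have hne : ¬(s = (j : Int)) := by omega
        simp [hne]
      rw [hcnt]

lemma pvCount_eq_of_nodup (S T : List Int) (hS : S.Nodup) (hT : T.Nodup)
    (h : ∀ z, z ∈ S ↔ z ∈ T) : ∀ z, S.count z = T.count z := by
  intro z
  by_cases hz : z ∈ S
  · rw [List.count_eq_one_of_mem hS hz, List.count_eq_one_of_mem hT ((h z).mp hz)]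
  · rw [List.count_eq_zero.mpr hz, List.count_eq_zero.mpr (fun hzT => hz ((h z).mpr hzT))]

lemma pvFoldAdd_eq (k : Int) (S T : List Int) (ans : List Int)
    (hcount : ∀ z, S.count z = T.count z)
    (hbS : ∀ s ∈ S, 0 ≤ s ∧ s.toNat < ans.length)
    (hbT : ∀ s ∈ T, 0 ≤ s ∧ s.toNat < ans.length) :
    S.foldl (fun (ans : List Int) yy => ans.set yy.toNat (ans.getD yy.toNat 0 + k)) ans =
    T.foldl (fun (ans : List Int) yy => ans.set yy.toNat (ans.getD yy.toNat 0 + k)) ans := by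
  apply List.ext_getElem (by rw [pvFoldAdd_length, pvFoldAdd_length])
  intro j hj hj'
  have hjl : j < ans.length := by rwa [pvFoldAdd_length] at hj
  have h1 := pvFoldAdd_getD k S ans j hbS hjl
  have h2 := pvFoldAdd_getD k T ans j hbT hjl
  rw [List.getD_eq_getElem _ _ hj] at h1
  rw [List.getD_eq_getElem _ _ hj'] at h2
  rw [h1, h2, hcount]

lemma pvFoldl_rel {α β γ : Type} (R : α → β → Prop) (fA : α → γ → α) (fB : β → γ → β) :
    ∀ (l : List γ) (a : α) (b : β), R a b →
      (∀ x a b, x ∈ l → R a b → R (fA a x) (fB b x)) →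
      R (l.foldl fA a) (l.foldl fB b) := by
  intro l
  induction l with
  | nil => intro a b h _; exact h
  | cons x l ih =>
    intro a b h hstep
    exact ih _ _ (hstep x a b List.mem_cons_self h)
      (fun y a' b' hy => hstep y a' b' (List.mem_cons_of_mem _ hy))


def pvApplyA (ans : List Int) (e : PySem.Set Int × Int) : List Int :=
  e.1.foldl (fun (ans : List Int) yy => ans.set yy.toNat (ans.getD yy.toNat 0 + e.2)) ans

def pvEval (W : Int) (info : List (PySem.Set Int × Int)) : List Int :=
  info.foldl pvApplyA (List.replicate W.toNat (0 : Int))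

lemma pvEval_length (W : Int) (info : List (PySem.Set Int × Int)) :
    (pvEval W info).length = W.toNat := by
  suffices h : ∀ (l : List (PySem.Set Int × Int)) (ans : List Int),
      (l.foldl pvApplyA ans).length = ans.length by
    rw [pvEval, h, List.length_replicate]
  intro l
  induction l with
  | nil => intro ans; rfl
  | cons e l ih =>
    intro ans
    rw [List.foldl_cons, ih]
    exact pvFoldAdd_length e.2 e.1 ans

lemma pvEval_append (W : Int) (info : List (PySem.Set Int × Int)) (e : PySem.Set Int × Int) :
    pvEval W (info ++ [e]) = pvApplyA (pvEval W info) e := by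
  simp [pvEval, List.foldl_append]

lemma pvCell_spec (g : List (List Int)) (H W : Int) (fuel : Nat)
    (hfuel : H.toNat * W.toNat < fuel) (x y : Int)
    (hx0 : 0 ≤ x) (hx1 : x < H) (hy0 : 0 ≤ y) (hy1 : y < W)
    (stA : List (List Bool) × List (PySem.Set Int × Int)) (stB : List (List Bool) × List Int)
    (hS : pvShape H W stA.1) (h1 : stB.1 = stA.1) (h2 : stB.2 = pvEval W stA.2) :
    pvShape H W (if pvGet g x y ≠ 0 ∧ pvVis stA.1 x y = false then
        (let r := bfsLoop g H W fuel (pvMark stA.1 x y, [(x, y)], 1, PySem.Set.ofList [y]);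
         (r.1, stA.2 ++ [(r.2.2.2, r.2.2.1)]))
      else stA).1 ∧
    (if pvGet g x y ≠ 0 ∧ pvVis stB.1 x y = false then
        (let r := satLoop g H W fuel (pvMark stB.1 x y) [(x, y)];
         (r.1, (PySem.Set.ofList (r.2.map Prod.snd)).foldl
            (fun (ans : List Int) yy => ans.set yy.toNat (ans.getD yy.toNat 0 + (r.2.length : Int)))
            stB.2))
      else stB).1 =
      (if pvGet g x y ≠ 0 ∧ pvVis stA.1 x y = false then
        (let r := bfsLoop g H W fuel (pvMark stA.1 x y, [(x, y)], 1, PySem.Set.ofList [y]);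
         (r.1, stA.2 ++ [(r.2.2.2, r.2.2.1)]))
      else stA).1 ∧
    (if pvGet g x y ≠ 0 ∧ pvVis stB.1 x y = false then
        (let r := satLoop g H W fuel (pvMark stB.1 x y) [(x, y)];
         (r.1, (PySem.Set.ofList (r.2.map Prod.snd)).foldl
            (fun (ans : List Int) yy => ans.set yy.toNat (ans.getD yy.toNat 0 + (r.2.length : Int)))
            stB.2))
      else stB).2 =
      pvEval W (if pvGet g x y ≠ 0 ∧ pvVis stA.1 x y = false then
        (let r := bfsLoop g H W fuel (pvMark stA.1 x y, [(x, y)], 1, PySem.Set.ofList [y]);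
         (r.1, stA.2 ++ [(r.2.2.2, r.2.2.1)]))
      else stA).2 := by
  rw [h1]
  by_cases hgd : pvGet g x y ≠ 0 ∧ pvVis stA.1 x y = false
  · rw [if_pos hgd, if_pos hgd]
    simp only
    have hInb : pvInb H W (x, y) := ⟨hx0, hx1, hy0, hy1⟩
    have hS1 : pvShape H W (pvMark stA.1 x y) := pvShape_mark hS hInb
    have hstart : pvVis (pvMark stA.1 x y) x y = true :=
      (pvVis_mark hS hInb x y hInb).mpr (Or.inr ⟨rfl, rfl⟩)
    have hQ : ∀ q ∈ [((x : Int), (y : Int))],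
        pvInb H W q ∧ pvVis (pvMark stA.1 x y) q.1 q.2 = true := by
      intro q hq
      have : q = (x, y) := by simpa using hq
      subst this
      exact ⟨hInb, hstart⟩
    have hcf : pvCf (pvMark stA.1 x y) ≤ H.toNat * W.toNat := pvCf_le hS1
    obtain ⟨aS, ach, acnt, aoil, anodup⟩ :=
      bfsLoop_spec g H W fuel (pvMark stA.1 x y) [(x, y)] 1 (PySem.Set.ofList [y]) hS1 hQ
        (by simp only [List.length_cons, List.length_nil]; omega)
    obtain ⟨sS, sch, scf, scm⟩ :=
      satLoop_spec g H W fuel (pvMark stA.1 x y) [(x, y)] hS1 hQ (by omega)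
    set rA := bfsLoop g H W fuel (pvMark stA.1 x y, [(x, y)], 1, PySem.Set.ofList [y]) with hrA
    set rB := satLoop g H W fuel (pvMark stA.1 x y) [(x, y)] with hrB
    have hveq : rB.1 = rA.1 := by
      apply pvMatEq sS aS
      intro a b hab
      have hA := ach (a, b) hab
      have hB := sch (a, b) hab
      by_cases h : pvVis rB.1 a b = true
      · rw [h, (hA.mpr (hB.mp h)).symm]
      · have hx : pvVis rB.1 a b = false := by simpa using h
        have hy : pvVis rA.1 a b = false := by
          by_cases h3 : pvVis rA.1 a b = true
          · exact absurd (hB.mpr (hA.mp h3)) h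
          · simpa using h3
        rw [hx, hy]
    have hcfeq : pvCf rB.1 = pvCf rA.1 := by rw [hveq]
    have hk : rA.2.2.1 = (rB.2.length : Int) := by
      have h3 : (1 : Nat) + pvCf (pvMark stA.1 x y) = rB.2.length + pvCf rB.1 := by
        rw [scf]; simp
      omega
    have hmemiff : ∀ z : Int, z ∈ rA.2.2.2 ↔ z ∈ PySem.Set.ofList (rB.2.map Prod.snd) := by
      intro z
      rw [aoil z, PySem.Set.mem_ofList, PySem.Set.mem_ofList]
      constructor
      · rintro (h | ⟨c, hInb', hv1, hv2, h3⟩)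
        · have : z = y := by simpa using h
          subst this
          refine List.mem_map.mpr ⟨(x, z), ?_, rfl⟩
          exact (scm (x, z)).mpr (Or.inl (by simp))
        · refine List.mem_map.mpr ⟨c, ?_, h3⟩
          exact (scm c).mpr (Or.inr ⟨hInb', hv1, by rwa [hveq]⟩)
      · intro h
        obtain ⟨c, hc, rfl⟩ := List.mem_map.mp h
        rcases (scm c).mp hc with h3 | ⟨hInb', hv1, hv2⟩
        · have : c = (x, y) := by simpa using h3
          subst this
          exact Or.inl (by simp)
        · exact Or.inr ⟨c, hInb', hv1, by rwa [← hveq], rfl⟩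
    have hboundsA : ∀ z ∈ rA.2.2.2, 0 ≤ z ∧ z < W := by
      intro z hz
      rcases (aoil z).mp hz with h | ⟨c, hInb', -, -, h3⟩
      · have : z = y := by simpa using h
        subst this; exact ⟨hy0, hy1⟩
      · rw [← h3]; exact ⟨hInb'.2.2.1, hInb'.2.2.2⟩
    have hlenB : stB.2.length = W.toNat := by rw [h2, pvEval_length]
    refine ⟨aS, by rw [hveq], ?_⟩
    rw [pvEval_append, ← h2]
    have hfold := pvFoldAdd_eq ((rB.2.length : Nat) : Int) (PySem.Set.ofList (rB.2.map Prod.snd)) rA.2.2.2 stB.2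
      (pvCount_eq_of_nodup _ _ (PySem.Set.nodup_ofList _)
        (anodup (PySem.Set.nodup_ofList _)) (fun z => (hmemiff z).symm))
      (by
        intro s hs
        have := hboundsA s ((hmemiff s).mpr hs)
        constructor
        · exact this.1
        · rw [hlenB]; omega)
      (by
        intro s hs
        have := hboundsA s hs
        constructor
        · exact this.1
        · rw [hlenB]; omega)
    have hrhs : pvApplyA stB.2 (rA.2.2.2, rA.2.2.1) =
        rA.2.2.2.foldl (fun (ans : List Int) yy =>
          ans.set yy.toNat (ans.getD yy.toNat 0 + rA.2.2.1)) stB.2 := rfl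
    rw [hrhs, hk]
    exact hfold
  · rw [if_neg hgd, if_neg hgd]
    exact ⟨hS, h1, h2⟩


lemma pvScan_rel (g : List (List Int)) (H W : Int) (fuel : Nat)
    (hfuel : H.toNat * W.toNat < fuel) (xs ys : List Int)
    (hxs : ∀ x ∈ xs, 0 ≤ x ∧ x < H) (hys : ∀ y ∈ ys, 0 ≤ y ∧ y < W)
    (stA : List (List Bool) × List (PySem.Set Int × Int)) (stB : List (List Bool) × List Int)
    (hS : pvShape H W stA.1) (h1 : stB.1 = stA.1) (h2 : stB.2 = pvEval W stA.2) :
    pvShape H W (xs.foldl (fun st x => ys.foldl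
      (fun (st : List (List Bool) × List (PySem.Set Int × Int)) y =>
        if pvGet g x y ≠ 0 ∧ pvVis st.1 x y = false then
          let r := bfsLoop g H W fuel (pvMark st.1 x y, [(x, y)], 1, PySem.Set.ofList [y])
          (r.1, st.2 ++ [(r.2.2.2, r.2.2.1)])
        else st) st) stA).1 ∧
    (xs.foldl (fun st x => ys.foldl
      (fun (st : List (List Bool) × List Int) y =>
        if pvGet g x y ≠ 0 ∧ pvVis st.1 x y = false then
          let r := satLoop g H W fuel (pvMark st.1 x y) [(x, y)]
          let cols : PySem.Set Int := PySem.Set.ofList (r.2.map Prod.snd)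
          (r.1, cols.foldl (fun (ans : List Int) yy =>
            ans.set yy.toNat (ans.getD yy.toNat 0 + (r.2.length : Int))) st.2)
        else st) st) stB).1 =
    (xs.foldl (fun st x => ys.foldl
      (fun (st : List (List Bool) × List (PySem.Set Int × Int)) y =>
        if pvGet g x y ≠ 0 ∧ pvVis st.1 x y = false then
          let r := bfsLoop g H W fuel (pvMark st.1 x y, [(x, y)], 1, PySem.Set.ofList [y])
          (r.1, st.2 ++ [(r.2.2.2, r.2.2.1)])
        else st) st) stA).1 ∧
    (xs.foldl (fun st x => ys.foldl
      (fun (st : List (List Bool) × List Int) y =>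
        if pvGet g x y ≠ 0 ∧ pvVis st.1 x y = false then
          let r := satLoop g H W fuel (pvMark st.1 x y) [(x, y)]
          let cols : PySem.Set Int := PySem.Set.ofList (r.2.map Prod.snd)
          (r.1, cols.foldl (fun (ans : List Int) yy =>
            ans.set yy.toNat (ans.getD yy.toNat 0 + (r.2.length : Int))) st.2)
        else st) st) stB).2 =
    pvEval W (xs.foldl (fun st x => ys.foldl
      (fun (st : List (List Bool) × List (PySem.Set Int × Int)) y =>
        if pvGet g x y ≠ 0 ∧ pvVis st.1 x y = false then
          let r := bfsLoop g H W fuel (pvMark st.1 x y, [(x, y)], 1, PySem.Set.ofList [y])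
          (r.1, st.2 ++ [(r.2.2.2, r.2.2.1)])
        else st) st) stA).2 := by
  apply pvFoldl_rel
    (fun (a : List (List Bool) × List (PySem.Set Int × Int)) (b : List (List Bool) × List Int) =>
      pvShape H W a.1 ∧ b.1 = a.1 ∧ b.2 = pvEval W a.2)
    _ _ xs stA stB ⟨hS, h1, h2⟩
  intro x a b hxmem hR
  apply pvFoldl_rel
    (fun (a : List (List Bool) × List (PySem.Set Int × Int)) (b : List (List Bool) × List Int) =>
      pvShape H W a.1 ∧ b.1 = a.1 ∧ b.2 = pvEval W a.2)
    _ _ ys a b hR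
  intro y a' b' hymem hR'
  exact pvCell_spec g H W fuel hfuel x y (hxs x hxmem).1 (hxs x hxmem).2
    (hys y hymem).1 (hys y hymem).2 a' b' hR'.1 hR'.2.1 hR'.2.2

theorem pv_solutions_eq (land : List (List Int)) : solution land = solution_alt land := by
  simp only [solution, solution_alt]
  have hinitS : pvShape (↑land.length) (↑(land.headI).length)
      (List.replicate (land.length : Int).toNat
        (List.replicate ((land.headI).length : Int).toNat false)) := by
    constructor
    · simp
    · intro r hr
      rw [List.eq_of_mem_replicate hr]
      simp
  obtain ⟨-, hv, he⟩ := pvScan_rel land (↑land.length) (↑(land.headI).length)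
    ((land.length : Int).toNat * ((land.headI).length : Int).toNat + 1) (by omega)
    (PySem.List.pyRange 0 (↑land.length) 1) (PySem.List.pyRange 0 (↑(land.headI).length) 1)
    (fun x hx => (PySem.List.mem_pyRange_one.mp hx))
    (fun y hy => (PySem.List.mem_pyRange_one.mp hy))
    (List.replicate (land.length : Int).toNat
        (List.replicate ((land.headI).length : Int).toNat false), [])
    (List.replicate (land.length : Int).toNat
        (List.replicate ((land.headI).length : Int).toNat false),
     List.replicate ((land.headI).length : Int).toNat (0 : Int))
    hinitS rfl rfl
  rw [he]
  rfl

-- ===== VERDICT (by name: the statement is the Claim_ definition above) =====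
theorem solution_spec : Claim_equal_solution := by
  intro land _ _
  unfold Spec_solution
  exact pv_solutions_eq land
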